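-- pv_equiv track=rewrite | github.com/Zelvax42/Juego-de-Baraja-Francesa-con-clases- | pares.py | puntaje
-- ===== SOURCE A (Python) =====
-- def puntaje(lista_diccionarios):
--     '''
--         Calcula el puntaje
--         recibe: lista de diccionarios
--         regresa una lista: puntaje, cantidad de pares, cantidad de tercias
--     '''
--
--     lista_puntaje = []
--     puntaje = 0
--     cantidad_pares = 0
--     cantidad_trios = 0
--     index = -1
--
--     for elemento in lista_diccionarios:
--         valor = elemento[1]
--         if valor >= 2:
--             lista_puntaje.append(elemento)
--             if valor == 2:
--                 cantidad_pares += 1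
--             if valor == 3:
--                 cantidad_trios += 1
--             index += 1
--
--             for carta in range(len(lista_puntaje)-index):
--                 cartas = lista_puntaje[index]
--                 puntaje += cartas[0]*cartas[1]
--
--     return puntaje, cantidad_pares, cantidad_trios
-- ===== SOURCE B (Python) =====
-- def puntaje(lista_diccionarios):
--     # Group-by aggregation: for each multiplicity c, accumulate (sum of card values, how many entries).
--     por_cantidad = {}
--     for valor, cantidad in lista_diccionarios:
--         s, n = por_cantidad.get(cantidad, (0, 0))
--         por_cantidad[cantidad] = (s + valor, n + 1)
--     total = 0
--     for c, (s, n) in por_cantidad.items():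
--         if c >= 2:
--             total += c * s
--     cantidad_pares = por_cantidad.get(2, (0, 0))[1]
--     cantidad_trios = por_cantidad.get(3, (0, 0))[1]
--     return total, cantidad_pares, cantidad_trios
-- ===== Notes on version B (the rewrite author's own statement) =====
-- stated objective: alternative
-- what changed: B builds a dictionary keyed by multiplicity, aggregating (sum of values, count of entries) per key in one grouping pass, then computes the score from the dict's items and reads the pair/trio counts by direct lookup at keys 2 and 3, instead of A's fused loop with its auxiliary list, index counter and always-once inner loop.
import Mathlib
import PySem

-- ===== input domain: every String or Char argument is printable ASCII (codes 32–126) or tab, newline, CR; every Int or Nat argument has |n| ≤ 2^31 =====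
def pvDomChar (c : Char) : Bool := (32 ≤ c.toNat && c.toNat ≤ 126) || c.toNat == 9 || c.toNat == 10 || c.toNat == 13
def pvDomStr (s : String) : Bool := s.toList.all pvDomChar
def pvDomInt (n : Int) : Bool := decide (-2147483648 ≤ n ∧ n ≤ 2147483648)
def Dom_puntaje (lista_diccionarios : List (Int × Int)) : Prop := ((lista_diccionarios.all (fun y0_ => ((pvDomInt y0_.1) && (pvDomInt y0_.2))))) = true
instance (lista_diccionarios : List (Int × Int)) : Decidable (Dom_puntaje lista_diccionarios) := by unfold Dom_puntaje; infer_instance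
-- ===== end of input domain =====

-- B replaces A's fused loop (vestigial auxiliary list, index counter and always-once inner loop)
-- by a group-by aggregation: a dict keyed by multiplicity holding (sum of values, count), read off afterwards.


-- ===== PORT A =====
-- one step of A's outer for-loop over state (lista_puntaje, puntaje, cantidad_pares, cantidad_trios, index)
-- lista_puntaje[index] is always in range in A; '.getD (0,0)' stands for the IndexError branch Python never reaches
def puntajeStep (st : List (Int × Int) × Int × Int × Int × Int) (elemento : Int × Int) :
    List (Int × Int) × Int × Int × Int × Int :=
  let (lista_puntaje, p, cantidad_pares, cantidad_trios, index) := st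
  let valor := elemento.2
  if valor ≥ 2 then
    let lista_puntaje := lista_puntaje ++ [elemento]
    let cantidad_pares := if valor = 2 then cantidad_pares + 1 else cantidad_pares
    let cantidad_trios := if valor = 3 then cantidad_trios + 1 else cantidad_trios
    let index := index + 1
    let p := (PySem.List.pyRange 0 ((lista_puntaje.length : Int) - index) 1).foldl
      (fun acc _ =>
        let cartas := (PySem.List.pyGet? lista_puntaje index).getD (0, 0)
        acc + cartas.1 * cartas.2) p
    (lista_puntaje, p, cantidad_pares, cantidad_trios, index)
  else
    (lista_puntaje, p, cantidad_pares, cantidad_trios, index)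

def puntaje (lista_diccionarios : List (Int × Int)) : Int × Int × Int :=
  let s := lista_diccionarios.foldl puntajeStep ([], 0, 0, 0, -1)
  (s.2.1, s.2.2.1, s.2.2.2.1)

-- ===== PORT B =====
-- one step of B's grouping loop: por_cantidad[cantidad] = (s + valor, n + 1)
def puntajeAcum (d : PySem.Dict Int (Int × Int)) (e : Int × Int) : PySem.Dict Int (Int × Int) :=
  d.insert e.2 ((d.getD e.2 (0, 0)).1 + e.1, (d.getD e.2 (0, 0)).2 + 1)

def puntaje_alt (lista_diccionarios : List (Int × Int)) : Int × Int × Int :=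
  let d := lista_diccionarios.foldl puntajeAcum PySem.Dict.empty
  (d.items.foldl (fun acc it => if it.1 ≥ 2 then acc + it.1 * it.2.1 else acc) 0,
   (d.getD 2 (0, 0)).2, (d.getD 3 (0, 0)).2)

-- ===== PRECONDITION & SPEC =====
def Spec_puntaje (lista_diccionarios : List (Int × Int)) (out : Int × Int × Int) : Prop := out = puntaje_alt lista_diccionarios
instance (lista_diccionarios : List (Int × Int)) (out : Int × Int × Int) : Decidable (Spec_puntaje lista_diccionarios out) := by unfold Spec_puntaje; infer_instance

-- ===== CLAIM (what is proved, stated in full; the proofs are below) =====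
def Claim_equal_puntaje : Prop := ∀ (lista_diccionarios : List (Int × Int)), Dom_puntaje lista_diccionarios → Spec_puntaje lista_diccionarios (puntaje lista_diccionarios)

-- ===== LEMMAS AND PROOFS =====

-- the canonical value both programs compute
def pvCanon (l : List (Int × Int)) : Int × Int × Int :=
  (((l.filter (fun e => e.2 ≥ 2)).map (fun e => e.1 * e.2)).sum,
   ((l.filter (fun e => e.2 = 2)).length : Int),
   ((l.filter (fun e => e.2 = 3)).length : Int))

-- ---- A side ----

-- the inner for-loop of A adds exactly lista_puntaje[index] once when index = len(lista_puntaje) - 1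
theorem puntajeStep_eq (lp : List (Int × Int)) (p cp ct : Int) (e : Int × Int) :
    puntajeStep (lp, p, cp, ct, (lp.length : Int) - 1) e =
      if e.2 ≥ 2 then
        (lp ++ [e], p + e.1 * e.2,
         (if e.2 = 2 then cp + 1 else cp),
         (if e.2 = 3 then ct + 1 else ct),
         ((lp ++ [e]).length : Int) - 1)
      else (lp, p, cp, ct, (lp.length : Int) - 1) := by
  unfold puntajeStep
  by_cases h : e.2 ≥ 2
  · simp only [h, if_true]
    have harg : (((lp ++ [e]).length : Int)) - ((lp.length : Int) - 1 + 1) = 1 := by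
      simp [List.length_append]
    rw [harg]
    have hr : PySem.List.pyRange 0 1 1 = [0] := by decide
    rw [hr]
    have hidx : (lp.length : Int) - 1 + 1 = (lp.length : Int) := by omega
    rw [hidx]
    rw [PySem.List.pyGet?_append_length (pre := lp) (y := e) (ys := [])]
    simp [List.foldl, List.length_append]
  · simp [h]

-- loop invariant for A's outer fold, generalised over the accumulated state
theorem foldl_puntajeStep (l : List (Int × Int)) :
    ∀ (lp : List (Int × Int)) (p cp ct : Int),
      (l.foldl puntajeStep (lp, p, cp, ct, (lp.length : Int) - 1)).2 =
        (p + ((l.filter (fun e => e.2 ≥ 2)).map (fun e => e.1 * e.2)).sum,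
         cp + ((l.filter (fun e => e.2 = 2)).length : Int),
         ct + ((l.filter (fun e => e.2 = 3)).length : Int),
         ((lp ++ l.filter (fun e => e.2 ≥ 2)).length : Int) - 1) := by
  induction l with
  | nil => intro lp p cp ct; simp
  | cons e t ih =>
    intro lp p cp ct
    simp only [List.foldl_cons, puntajeStep_eq]
    by_cases h : e.2 ≥ 2
    · simp only [h, if_true]
      rw [ih]
      by_cases h2 : e.2 = 2 <;> by_cases h3 : e.2 = 3 <;>
        simp [h, h2, h3, List.length_append, List.append_assoc] <;> and_intros <;> try ring
    · simp only [h, if_false]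
      rw [ih]
      have h2 : ¬ e.2 = 2 := by omega
      have h3 : ¬ e.2 = 3 := by omega
      simp [h, h2, h3]

theorem puntaje_eq_canon (l : List (Int × Int)) : puntaje l = pvCanon l := by
  unfold puntaje pvCanon
  have h := foldl_puntajeStep l [] 0 0 0
  simp only [List.length_nil, Int.natCast_zero, zero_sub] at h
  simp [h]

-- ---- B side ----

-- B's grouping dict stores, per key c, the sum of values and the number of entries with multiplicity c
theorem getD_puntajeAcum (l : List (Int × Int)) :
    ∀ (d : PySem.Dict Int (Int × Int)) (c : Int),
      (l.foldl puntajeAcum d).getD c (0, 0) =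
        ((d.getD c (0, 0)).1 + ((l.filter (fun e => e.2 = c)).map (·.1)).sum,
         (d.getD c (0, 0)).2 + ((l.filter (fun e => e.2 = c)).length : Int)) := by
  induction l with
  | nil => intro d c; simp
  | cons e t ih =>
    intro d c
    simp only [List.foldl_cons]
    rw [ih]
    unfold puntajeAcum
    rw [PySem.Dict.getD_insert]
    by_cases h : e.2 = c
    · simp [h, Prod.ext_iff]; constructor <;> ring
    · have h' : ¬ (c = e.2) := fun hh => h hh.symm
      simp [h, h']

-- a foldl with a guarded add is the sum of a guarded map
theorem foldl_guard_sum (its : List (Int × (Int × Int))) :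
    ∀ (acc : Int),
      its.foldl (fun acc it => if it.1 ≥ 2 then acc + it.1 * it.2.1 else acc) acc =
        acc + (its.map (fun it => if it.1 ≥ 2 then it.1 * it.2.1 else 0)).sum := by
  induction its with
  | nil => intro acc; simp
  | cons it t ih =>
    intro acc
    simp only [List.foldl_cons, List.map_cons, List.sum_cons]
    rw [ih]
    split_ifs <;> ring

-- splitting a sum over a list by a Boolean predicate
theorem sum_map_split (l : List (Int × Int)) (f : (Int × Int) → Int) (p : (Int × Int) → Bool) :
    (l.map f).sum = ((l.filter p).map f).sum + ((l.filter (fun e => ! p e)).map f).sum := by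
  induction l with
  | nil => simp
  | cons e t ih =>
    by_cases h : p e = true <;> simp [h, ih] <;> ring

-- the guarded sum over a fiber (all elements share key c)
theorem sum_fiber (c : Int) (A : List (Int × Int)) (hA : ∀ e ∈ A, e.2 = c) :
    (A.map (fun e => if e.2 ≥ 2 then e.1 * e.2 else 0)).sum =
      if c ≥ 2 then c * ((A.map (·.1)).sum) else 0 := by
  induction A with
  | nil => simp
  | cons e t ih =>
    have he : e.2 = c := hA e (by simp)
    have ht : ∀ x ∈ t, x.2 = c := fun x hx => hA x (by simp [hx])
    simp only [List.map_cons, List.sum_cons, ih ht, he]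
    split_ifs <;> ring

-- a guarded sum over the whole list is the sum over the filtered list
theorem sum_guard_filter (l : List (Int × Int)) :
    (l.map (fun e => if e.2 ≥ 2 then e.1 * e.2 else 0)).sum =
      ((l.filter (fun e => e.2 ≥ 2)).map (fun e => e.1 * e.2)).sum := by
  induction l with
  | nil => simp
  | cons e t ih => by_cases h : e.2 ≥ 2 <;> simp [h, ih]

-- the group-by identity: summing per distinct key equals summing over the list
theorem sum_groupby (ks : List Int) :
    ∀ (l : List (Int × Int)), ks.Nodup → (∀ e ∈ l, e.2 ∈ ks) →
      (ks.map (fun c => if c ≥ 2 then c * ((l.filter (fun e => e.2 = c)).map (·.1)).sum else 0)).sum =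
        (l.map (fun e => if e.2 ≥ 2 then e.1 * e.2 else 0)).sum := by
  induction ks with
  | nil =>
    intro l _ hcov
    cases l with
    | nil => simp
    | cons e t => exact absurd (hcov e (by simp)) (by simp)
  | cons c ks ih =>
    intro l hnd hcov
    have hcnot : c ∉ ks := (List.nodup_cons.mp hnd).1
    have hndk : ks.Nodup := (List.nodup_cons.mp hnd).2
    set B := l.filter (fun e => ! decide (e.2 = c)) with hB
    -- for keys in ks, the fiber of l equals the fiber of B
    have hfib : ∀ c' ∈ ks, l.filter (fun e => e.2 = c') = B.filter (fun e => e.2 = c') := by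
      intro c' hc'
      have hne : c' ≠ c := fun h => hcnot (h ▸ hc')
      rw [hB, List.filter_filter]
      apply List.filter_congr
      intro e _
      by_cases h : e.2 = c'
      · have h2 : ¬ e.2 = c := by rw [h]; exact hne
        simp [h, hne]
      · simp [h]
    have hcovB : ∀ e ∈ B, e.2 ∈ ks := by
      intro e he
      rw [hB, List.mem_filter] at he
      have := hcov e he.1
      have hne : ¬ (e.2 = c) := by simpa using he.2
      simp only [List.mem_cons] at this
      tauto
    have hIH := ih B hndk hcovB
    have hmapcongr :
        (ks.map (fun c' => if c' ≥ 2 then c' * ((l.filter (fun e => e.2 = c')).map (·.1)).sum else 0)) =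
        (ks.map (fun c' => if c' ≥ 2 then c' * ((B.filter (fun e => e.2 = c')).map (·.1)).sum else 0)) := by
      apply List.map_congr_left
      intro c' hc'
      rw [hfib c' hc']
    have hsplit := sum_map_split l (fun e => if e.2 ≥ 2 then e.1 * e.2 else 0) (fun e => decide (e.2 = c))
    have hfibc : ∀ e ∈ l.filter (fun e => decide (e.2 = c)), e.2 = c := by
      intro e he
      have := (List.mem_filter.mp he).2
      simpa using this
    rw [List.map_cons]
    rw [List.sum_cons]
    rw [hmapcongr]
    rw [hIH]
    rw [hsplit, sum_fiber c _ hfibc]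

theorem puntaje_alt_eq_canon (l : List (Int × Int)) : puntaje_alt l = pvCanon l := by
  show ((l.foldl puntajeAcum PySem.Dict.empty).items.foldl
          (fun acc it => if it.1 ≥ 2 then acc + it.1 * it.2.1 else acc) 0,
        ((l.foldl puntajeAcum PySem.Dict.empty).getD 2 (0, 0)).2,
        ((l.foldl puntajeAcum PySem.Dict.empty).getD 3 (0, 0)).2) = pvCanon l
  set d := l.foldl puntajeAcum PySem.Dict.empty with hd
  have hunf : l.foldl puntajeAcum PySem.Dict.empty =
      l.foldl (fun d (e : Int × Int) =>
        d.insert e.2 ((d.getD e.2 (0, 0)).1 + e.1, (d.getD e.2 (0, 0)).2 + 1)) PySem.Dict.empty := rfl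
  have hnd : d.keys.Nodup := by
    rw [hd, hunf]
    exact PySem.Dict.nodup_keys_foldl_insert_key l (fun e => e.2)
      (fun d e => ((d.getD e.2 (0, 0)).1 + e.1, (d.getD e.2 (0, 0)).2 + 1))
      PySem.Dict.empty (by simp [PySem.Dict.keys_empty])
  have hkeys : d.keys = PySem.Set.ofList (l.map (fun e => e.2)) := by
    rw [hd, hunf]
    rw [PySem.Dict.keys_foldl_insert_key l (fun e => e.2)
      (fun d e => ((d.getD e.2 (0, 0)).1 + e.1, (d.getD e.2 (0, 0)).2 + 1)) PySem.Dict.empty]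
    simp [PySem.Dict.keys_empty, PySem.Set.update, PySem.Set.ofList_eq_foldl]
  have hgetD : ∀ c : Int, d.getD c (0, 0) =
      (((l.filter (fun e => e.2 = c)).map (·.1)).sum, ((l.filter (fun e => e.2 = c)).length : Int)) := by
    intro c
    rw [hd, getD_puntajeAcum l PySem.Dict.empty c]
    simp
  have hitems := PySem.Dict.items_eq_map_keys d hnd (0, 0)
  have hcov : ∀ e ∈ l, e.2 ∈ d.keys := by
    intro e he
    rw [hkeys]
    have hm : e.2 ∈ l.map (fun e => e.2) := List.mem_map.mpr ⟨e, he, rfl⟩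
    rw [← PySem.List.dedup_eq_ofList]
    exact (PySem.List.mem_dedup _ _).mpr hm
  have htotal :
      d.items.foldl (fun acc it => if it.1 ≥ 2 then acc + it.1 * it.2.1 else acc) 0 =
        ((l.filter (fun e => e.2 ≥ 2)).map (fun e => e.1 * e.2)).sum := by
    rw [foldl_guard_sum, hitems, List.map_map]
    have hcomp : ((fun it : Int × Int × Int => if it.1 ≥ 2 then it.1 * it.2.1 else 0) ∘
        fun k => (k, d.getD k (0, 0))) =
        fun c => if c ≥ 2 then c * ((l.filter (fun e => e.2 = c)).map (·.1)).sum else 0 := by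
      funext c
      simp [hgetD c]
    rw [hcomp, sum_groupby d.keys l hnd hcov, sum_guard_filter]
    ring
  rw [htotal, hgetD 2, hgetD 3]
  rfl

-- ===== VERDICT (by name: the statement is the Claim_ definition above) =====
theorem puntaje_spec : Claim_equal_puntaje := by
  intro l _
  show puntaje l = puntaje_alt l
  rw [puntaje_eq_canon, puntaje_alt_eq_canon]
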